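-- pv_equiv track=rewrite | github.com/pwmcclung/newCodeProbs | sharkovsky.py | s_vs
-- ===== SOURCE A (Python) =====
-- def s_vs(n):
--         k = 0
--         while n % 2 == 0 and n > 0:
--             n //= 2
--             k += 1
--
--         if n == 1 and k > 0:
--             return (2, 0, k)
--         elif n % 2 != 0:
--             return (1, n, k)
--         else:
--             return(0, 0, 0)
-- ===== SOURCE B (Python) =====
-- def s_vs(n):
--     if n > 0:
--         k = (n & -n).bit_length() - 1
--         m = n >> k
--     else:
--         k = 0
--         m = n
--     if m == 1 and k > 0:
--         return (2, 0, k)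
--     if m % 2 != 0:
--         return (1, m, k)
--     return (0, 0, 0)
-- ===== Notes on version B (the rewrite author's own statement) =====
-- stated objective: idiomatic
-- what changed: B replaces A's while-loop that repeatedly halves n with a closed-form bit computation: for positive n it derives the power-of-two exponent from the lowest set bit's bit_length and gets the odd part by a single shift, then applies the same three-way classification.
import Mathlib
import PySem

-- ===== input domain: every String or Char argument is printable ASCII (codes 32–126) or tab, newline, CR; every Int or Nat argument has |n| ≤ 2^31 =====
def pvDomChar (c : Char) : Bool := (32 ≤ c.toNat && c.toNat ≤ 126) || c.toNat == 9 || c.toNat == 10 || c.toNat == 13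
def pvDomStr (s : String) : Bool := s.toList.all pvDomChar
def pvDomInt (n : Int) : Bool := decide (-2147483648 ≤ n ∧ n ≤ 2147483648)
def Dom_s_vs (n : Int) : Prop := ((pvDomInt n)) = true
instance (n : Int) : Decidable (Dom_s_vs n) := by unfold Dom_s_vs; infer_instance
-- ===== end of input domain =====

-- B computes the power-of-2 factorization in closed form by bit operations instead of A's halving loop; same results everywhere.

-- ===== PORT A =====
-- the while loop: strips factors of 2 while n is even and positive, counting them in k
def s_vs_loop (n k : Int) : Int × Int :=
  if h : PySem.Int.mod n 2 = 0 ∧ n > 0 then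
    s_vs_loop (PySem.Int.floordiv n 2) (k + 1)
  else (n, k)
termination_by n.toNat
decreasing_by
  rw [PySem.Int.floordiv_eq_ediv_of_pos (by omega)]
  omega

def s_vs (n : Int) : Int × Int × Int :=
  let p := s_vs_loop n 0
  if p.1 = 1 ∧ p.2 > 0 then (2, 0, p.2)
  else if PySem.Int.mod p.1 2 ≠ 0 then (1, p.1, p.2)
  else (0, 0, 0)

-- ===== PORT B =====
def s_vs_alt (n : Int) : Int × Int × Int :=
  let p : Int × Int :=
    if n > 0 then
      let k : Int := (PySem.Int.bitLength (PySem.Int.band n (-n)) : Int) - 1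
      (k, n >>> k.toNat)   -- Python's n >> k (k ≥ 0 here since n > 0)
    else (0, n)
  if p.2 = 1 ∧ p.1 > 0 then (2, 0, p.1)
  else if PySem.Int.mod p.2 2 ≠ 0 then (1, p.2, p.1)
  else (0, 0, 0)

-- ===== PRECONDITION & SPEC =====
def Spec_s_vs (n : Int) (out : Int × Int × Int) : Prop := out = s_vs_alt n
instance (n : Int) (out : Int × Int × Int) : Decidable (Spec_s_vs n out) := by unfold Spec_s_vs; infer_instance

-- ===== CLAIM (what is proved, stated in full; the proofs are below) =====
def Claim_equal_s_vs : Prop := ∀ (n : Int), Dom_s_vs n → Spec_s_vs n (s_vs n)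

-- ===== LEMMAS AND PROOFS =====

theorem nat_and_pred_odd (c : Nat) (h : c % 2 = 1) : c &&& (c - 1) = c - 1 := by
  obtain ⟨d, rfl⟩ : ∃ d, c = 2 * d + 1 := ⟨c / 2, by omega⟩
  have hb := Nat.land_bit true d false d
  simp [Nat.bit] at hb
  simpa using hb

theorem nat_and_pred_even (c : Nat) (h0 : 0 < c) (h : c % 2 = 0) :
    c &&& (c - 1) = 2 * (c / 2 &&& (c / 2 - 1)) := by
  obtain ⟨d, rfl⟩ : ∃ d, c = 2 * d := ⟨c / 2, by omega⟩
  have hd : 0 < d := by omega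
  have hb := Nat.land_bit false d true (d - 1)
  simp [Nat.bit] at hb
  have h1 : 2 * d - 1 = 2 * (d - 1) + 1 := by omega
  have h2 : 2 * d / 2 = d := by omega
  rw [h1, h2, hb]

theorem band_neg_self (n : Int) (h : 0 < n) :
    PySem.Int.band n (-n) = ((n.toNat - (n.toNat &&& (n.toNat - 1)) : Nat) : Int) := by
  have h1 : ¬ (0 ≤ -n) := by omega
  have h2 : (0 : Int) ≤ n := by omega
  simp only [PySem.Int.band, if_pos h2, if_neg h1, neg_neg]
  have h3 : (n - 1).toNat = n.toNat - 1 := by omega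
  rw [h3]

-- main invariant, strong induction on a
theorem loop_main (a : Nat) : 0 < a → ∀ (k : Int),
    ∃ j : Nat, PySem.Int.band (a : Int) (-(a : Int)) = ((2 ^ j : Nat) : Int) ∧
      s_vs_loop (a : Int) k = (((a >>> j : Nat) : Int), k + j) := by
  induction a using Nat.strong_induction_on with
  | _ a ih =>
    intro ha k
    have hband := band_neg_self (a : Int) (by exact_mod_cast ha)
    simp only [Int.toNat_natCast] at hband
    by_cases hodd : a % 2 = 1
    · refine ⟨0, ?_, ?_⟩
      · rw [hband, nat_and_pred_odd a hodd]
        congr 1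
        omega
      · rw [s_vs_loop]
        rw [dif_neg]
        · simp
        · simp only [not_and]
          intro hm
          exfalso
          have : PySem.Int.mod (a : Int) 2 = ((a % 2 : Nat) : Int) := by simp
          rw [this, hodd] at hm
          norm_num at hm
    · have heven : a % 2 = 0 := by omega
      have hc : 0 < a / 2 := by omega
      obtain ⟨j, hbj, hlj⟩ := ih (a / 2) (by omega) hc (k + 1)
      refine ⟨j + 1, ?_, ?_⟩
      · have hband2 := band_neg_self ((a / 2 : Nat) : Int) (by exact_mod_cast hc)
        simp only [Int.toNat_natCast] at hband2
        rw [hband2] at hbj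
        rw [hband, nat_and_pred_even a (by omega) heven]
        have hle : a / 2 &&& (a / 2 - 1) ≤ a / 2 := Nat.and_le_left
        have hval : a / 2 - (a / 2 &&& (a / 2 - 1)) = 2 ^ j := by exact_mod_cast hbj
        have : a - 2 * (a / 2 &&& (a / 2 - 1)) = 2 ^ (j + 1) := by
          rw [pow_succ]
          omega
        rw [this]
      · have hm0 : PySem.Int.mod (a : Int) 2 = 0 := by
          have hmc : PySem.Int.mod (a : Int) 2 = ((a % 2 : Nat) : Int) := by simp
          rw [hmc, heven]; simp
        rw [s_vs_loop]
        rw [dif_pos ⟨hm0, by exact_mod_cast ha⟩]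
        have hfd : PySem.Int.floordiv (a : Int) 2 = ((a / 2 : Nat) : Int) := by simp
        rw [hfd, hlj]
        have hsr : (a / 2) >>> j = a >>> (j + 1) := by
          rw [Nat.shiftRight_eq_div_pow, Nat.shiftRight_eq_div_pow, Nat.div_div_eq_div_mul,
            pow_succ, mul_comm 2 (2 ^ j)]
        rw [hsr]
        simp only [Prod.mk.injEq]
        refine ⟨trivial, by push_cast; ring⟩

theorem bitLength_two_pow (j : Nat) : PySem.Int.bitLength (((2 ^ j : Nat) : Int)) = j + 1 := by
  induction j with
  | zero => rw [PySem.Int.bitLength_natCast (by norm_num)]; simp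
  | succ j ihj =>
    rw [PySem.Int.bitLength_natCast (by positivity)]
    have : 2 ^ (j + 1) / 2 = 2 ^ j := by
      rw [pow_succ]
      omega
    rw [this, ihj]

-- ===== VERDICT (by name: the statement is the Claim_ definition above) =====
theorem s_vs_spec : Claim_equal_s_vs := by
  intro n _
  unfold Spec_s_vs s_vs s_vs_alt
  by_cases hn : n > 0
  · obtain ⟨a, rfl⟩ : ∃ a : Nat, n = (a : Int) := ⟨n.toNat, by omega⟩
    have ha : 0 < a := by exact_mod_cast hn
    obtain ⟨j, hb, hl⟩ := loop_main a ha 0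
    rw [if_pos hn, hb, bitLength_two_pow, hl]
    have hk : (((j + 1 : Nat) : Int) - 1) = (j : Int) := by push_cast; ring
    rw [hk]
    simp
  · rw [s_vs_loop, dif_neg (by simp only [not_and]; intro _; omega), if_neg hn]
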